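-- pv_equiv track=rewrite | github.com/NadgirVasudevRao/MedicFinderAI- | utils/ai_matcher.py | are_related_specialties
-- ===== SOURCE A (Python) =====
-- def are_related_specialties(spec1, spec2):
--     """
--     Check if two medical specialties are related.
--
--     Args:
--         spec1: First specialty
--         spec2: Second specialty
--
--     Returns:
--         Boolean indicating if specialties are related
--     """
--     # Define related specialty groups
--     related_groups = [
--         ["Cardiology", "Cardiac Surgery", "Cardiovascular Surgery"],
--         ["Neurology", "Neurosurgery", "Neurological Surgery"],
--         ["Orthopedics", "Orthopedic Surgery", "Sports Medicine"],
--         ["Gastroenterology", "Hepatology", "GI Surgery"],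
--         ["Oncology", "Surgical Oncology", "Medical Oncology", "Radiation Therapy"],
--         ["Urology", "Nephrology", "Kidney Transplant"],
--         ["Obstetrics", "Gynecology", "Reproductive Medicine"],
--         ["Pediatrics", "Neonatology", "Pediatric Surgery"],
--         ["Internal Medicine", "General Medicine", "Family Medicine"],
--         ["Emergency Medicine", "Trauma Surgery", "Critical Care"],
--         ["Psychiatry", "Psychology", "Mental Health"],
--         ["Pulmonology", "Respiratory Medicine", "Thoracic Surgery"]
--     ]
--
--     spec1_lower = spec1.lower()
--     spec2_lower = spec2.lower()
--
--     for group in related_groups: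
--         group_lower = [s.lower() for s in group]
--         if spec1_lower in group_lower and spec2_lower in group_lower:
--             return True
--
--     return False
-- ===== SOURCE B (Python) =====
-- # Precomputed lowercase-name -> group-index table; two lookups replace A's per-call group scan.
-- _SPECIALTY_GROUP = {
--     "cardiology": 0, "cardiac surgery": 0, "cardiovascular surgery": 0,
--     "neurology": 1, "neurosurgery": 1, "neurological surgery": 1,
--     "orthopedics": 2, "orthopedic surgery": 2, "sports medicine": 2,
--     "gastroenterology": 3, "hepatology": 3, "gi surgery": 3,
--     "oncology": 4, "surgical oncology": 4, "medical oncology": 4, "radiation therapy": 4,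
--     "urology": 5, "nephrology": 5, "kidney transplant": 5,
--     "obstetrics": 6, "gynecology": 6, "reproductive medicine": 6,
--     "pediatrics": 7, "neonatology": 7, "pediatric surgery": 7,
--     "internal medicine": 8, "general medicine": 8, "family medicine": 8,
--     "emergency medicine": 9, "trauma surgery": 9, "critical care": 9,
--     "psychiatry": 10, "psychology": 10, "mental health": 10,
--     "pulmonology": 11, "respiratory medicine": 11, "thoracic surgery": 11,
-- }
--
-- def are_related_specialties(spec1, spec2):
--     """Check if two medical specialties are related (same group)."""
--     g1 = _SPECIALTY_GROUP.get(spec1.lower())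
--     return g1 is not None and g1 == _SPECIALTY_GROUP.get(spec2.lower())
-- ===== Notes on version B (the rewrite author's own statement) =====
-- stated objective: idiomatic
-- what changed: Replaced the per-call scan that lowercases every group and tests both names with a precomputed lowercase-name-to-group-index dictionary, so the answer is two dictionary lookups and an index comparison guarded by a not-None check.
import Mathlib
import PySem

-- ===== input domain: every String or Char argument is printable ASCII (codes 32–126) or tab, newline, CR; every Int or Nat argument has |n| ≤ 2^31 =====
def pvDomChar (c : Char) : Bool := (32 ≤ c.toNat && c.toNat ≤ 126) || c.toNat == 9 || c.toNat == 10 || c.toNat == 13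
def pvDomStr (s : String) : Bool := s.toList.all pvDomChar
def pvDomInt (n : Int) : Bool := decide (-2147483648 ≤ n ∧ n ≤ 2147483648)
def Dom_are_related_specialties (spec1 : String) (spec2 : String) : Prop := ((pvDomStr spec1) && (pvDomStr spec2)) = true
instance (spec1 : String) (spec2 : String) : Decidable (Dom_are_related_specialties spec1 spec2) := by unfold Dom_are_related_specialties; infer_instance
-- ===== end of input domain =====

-- B replaces A's per-call scan over every group with a precomputed lowercase-name -> group-index
-- dictionary literal and two lookups (idiomatic; same result for all string inputs).


set_option maxRecDepth 16384
set_option maxHeartbeats 1000000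

-- ===== PORT A =====
def relatedGroups : List (List String) := [
  ["Cardiology", "Cardiac Surgery", "Cardiovascular Surgery"],
  ["Neurology", "Neurosurgery", "Neurological Surgery"],
  ["Orthopedics", "Orthopedic Surgery", "Sports Medicine"],
  ["Gastroenterology", "Hepatology", "GI Surgery"],
  ["Oncology", "Surgical Oncology", "Medical Oncology", "Radiation Therapy"],
  ["Urology", "Nephrology", "Kidney Transplant"],
  ["Obstetrics", "Gynecology", "Reproductive Medicine"],
  ["Pediatrics", "Neonatology", "Pediatric Surgery"],
  ["Internal Medicine", "General Medicine", "Family Medicine"],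
  ["Emergency Medicine", "Trauma Surgery", "Critical Care"],
  ["Psychiatry", "Psychology", "Mental Health"],
  ["Pulmonology", "Respiratory Medicine", "Thoracic Surgery"]]

def are_related_specialties (spec1 : String) (spec2 : String) : Bool :=
  let spec1_lower := PySem.Str.lower spec1
  let spec2_lower := PySem.Str.lower spec2
  relatedGroups.any (fun group =>
    let group_lower := group.map PySem.Str.lower
    group_lower.contains spec1_lower && group_lower.contains spec2_lower)

-- ===== PORT B =====
-- the module-level dict literal _SPECIALTY_GROUP of Source B
def specialtyGroup : PySem.Dict String Int := PySem.Dict.ofList [("cardiology", (0 : Int)), ("cardiac surgery", (0 : Int)), ("cardiovascular surgery", (0 : Int)), ("neurology", (1 : Int)), ("neurosurgery", (1 : Int)), ("neurological surgery", (1 : Int)), ("orthopedics", (2 : Int)), ("orthopedic surgery", (2 : Int)), ("sports medicine", (2 : Int)), ("gastroenterology", (3 : Int)), ("hepatology", (3 : Int)), ("gi surgery", (3 : Int)), ("oncology", (4 : Int)), ("surgical oncology", (4 : Int)), ("medical oncology", (4 : Int)), ("radiation therapy", (4 : Int)), ("urology", (5 : Int)), ("nephrology", (5 : Int)), ("kidney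 transplant", (5 : Int)), ("obstetrics", (6 : Int)), ("gynecology", (6 : Int)), ("reproductive medicine", (6 : Int)), ("pediatrics", (7 : Int)), ("neonatology", (7 : Int)), ("pediatric surgery", (7 : Int)), ("internal medicine", (8 : Int)), ("general medicine", (8 : Int)), ("family medicine", (8 : Int)), ("emergency medicine", (9 : Int)), ("trauma surgery", (9 : Int)), ("critical care", (9 : Int)), ("psychiatry", (10 : Int)), ("psychology", (10 : Int)), ("mental health", (10 : Int)), ("pulmonology", (11 : Int)), ("respiratory medicine", (11 : Int)), ("thoracic surgery", (11 : Int))]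

def are_related_specialties_alt (spec1 : String) (spec2 : String) : Bool :=
  let g1 := specialtyGroup.get? (PySem.Str.lower spec1)
  g1.isSome && g1 == specialtyGroup.get? (PySem.Str.lower spec2)

-- ===== PRECONDITION & SPEC =====
def Spec_are_related_specialties (spec1 : String) (spec2 : String) (out : Bool) : Prop := out = are_related_specialties_alt spec1 spec2
instance (spec1 : String) (spec2 : String) (out : Bool) : Decidable (Spec_are_related_specialties spec1 spec2 out) := by unfold Spec_are_related_specialties; infer_instance

-- ===== CLAIM (what is proved, stated in full; the proofs are below) =====
def Claim_equal_are_related_specialties : Prop := ∀ (spec1 : String) (spec2 : String), Dom_are_related_specialties spec1 spec2 → Spec_are_related_specialties spec1 spec2 (are_related_specialties spec1 spec2)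

-- ===== LEMMAS AND PROOFS =====

/-- Proof-side view of the lookup: the group index of a lowercased name. -/
def pvClassify (t : String) : Option Int :=
  if t == "cardiology" then some 0 else if t == "cardiac surgery" then some 0 else if t == "cardiovascular surgery" then some 0 else if t == "neurology" then some 1 else if t == "neurosurgery" then some 1 else if t == "neurological surgery" then some 1 else if t == "orthopedics" then some 2 else if t == "orthopedic surgery" then some 2 else if t == "sports medicine" then some 2 else if t == "gastroenterology" then some 3 else if t == "hepatology" then some 3 else if t == "gi surgery" then some 3 else if t == "oncology" then some 4 else if t == "surgical oncology" then some 4 else if t == "medical oncology" then some 4 else if t == "radiation therapy" then some 4 else if t == "urology" then some 5 else if t == "nephrology" then some 5 else if t == "kidney transplant" then some 5 else if t == "obstetrics" then some 6 else if t == "gynecology" then some 6 else if t == "reproductive medicine" then some 6 else if t == "pediatrics" then some 7 else if t == "neonatology" then some 7 else if t == "pediatric surgery" then some 7 else if t == "internal medicine" then some 8 else if t == "general medicine" then some 8 else if t == "family medicine" then some 8 else if t == "emergency medicine" then some 9 else if t == "trauma surgery" then some 9 else if t == "critical care" then some 9 else if t == "psychiatry" then some 10 else if t == "psychology" then some 10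 else if t == "mental health" then some 10 else if t == "pulmonology" then some 11 else if t == "respiratory medicine" then some 11 else if t == "thoracic surgery" then some 11 else none

lemma pvIndex_get (t : String) : specialtyGroup.get? t = pvClassify t := by
  have h : specialtyGroup = PySem.Dict.mk [("cardiology", 0), ("cardiac surgery", 0), ("cardiovascular surgery", 0), ("neurology", 1), ("neurosurgery", 1), ("neurological surgery", 1), ("orthopedics", 2), ("orthopedic surgery", 2), ("sports medicine", 2), ("gastroenterology", 3), ("hepatology", 3), ("gi surgery", 3), ("oncology", 4), ("surgical oncology", 4), ("medical oncology", 4), ("radiation therapy", 4), ("urology", 5), ("nephrology", 5), ("kidney transplant", 5), ("obstetrics", 6), ("gynecology", 6), ("reproductive medicine", 6), ("pediatrics", 7), ("neonatology", 7), ("pediatric surgery", 7), ("internal medicine", 8), ("general medicine", 8), ("family medicine", 8), ("emergency medicine", 9), ("trauma surgery", 9), ("critical care", 9), ("psychiatry", 10), ("psychology", 10), ("mental health", 10), ("pulmonology", 11), ("respiratory medicine", 11), ("thoracic surgery", 11)] := by decide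
  rw [h]
  simp only [PySem.Dict.get?_mk_cons, pvClassify, Bool.beq_comm]
  rfl

lemma pvMapLower0 : (["Cardiology", "Cardiac Surgery", "Cardiovascular Surgery"] : List String).map PySem.Str.lower = ["cardiology", "cardiac surgery", "cardiovascular surgery"] := by decide
lemma pvMapLower1 : (["Neurology", "Neurosurgery", "Neurological Surgery"] : List String).map PySem.Str.lower = ["neurology", "neurosurgery", "neurological surgery"] := by decide
lemma pvMapLower2 : (["Orthopedics", "Orthopedic Surgery", "Sports Medicine"] : List String).map PySem.Str.lower = ["orthopedics", "orthopedic surgery", "sports medicine"] := by decide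
lemma pvMapLower3 : (["Gastroenterology", "Hepatology", "GI Surgery"] : List String).map PySem.Str.lower = ["gastroenterology", "hepatology", "gi surgery"] := by decide
lemma pvMapLower4 : (["Oncology", "Surgical Oncology", "Medical Oncology", "Radiation Therapy"] : List String).map PySem.Str.lower = ["oncology", "surgical oncology", "medical oncology", "radiation therapy"] := by decide
lemma pvMapLower5 : (["Urology", "Nephrology", "Kidney Transplant"] : List String).map PySem.Str.lower = ["urology", "nephrology", "kidney transplant"] := by decide
lemma pvMapLower6 : (["Obstetrics", "Gynecology", "Reproductive Medicine"] : List String).map PySem.Str.lower = ["obstetrics", "gynecology", "reproductive medicine"] := by decide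
lemma pvMapLower7 : (["Pediatrics", "Neonatology", "Pediatric Surgery"] : List String).map PySem.Str.lower = ["pediatrics", "neonatology", "pediatric surgery"] := by decide
lemma pvMapLower8 : (["Internal Medicine", "General Medicine", "Family Medicine"] : List String).map PySem.Str.lower = ["internal medicine", "general medicine", "family medicine"] := by decide
lemma pvMapLower9 : (["Emergency Medicine", "Trauma Surgery", "Critical Care"] : List String).map PySem.Str.lower = ["emergency medicine", "trauma surgery", "critical care"] := by decide
lemma pvMapLower10 : (["Psychiatry", "Psychology", "Mental Health"] : List String).map PySem.Str.lower = ["psychiatry", "psychology", "mental health"] := by decide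
lemma pvMapLower11 : (["Pulmonology", "Respiratory Medicine", "Thoracic Surgery"] : List String).map PySem.Str.lower = ["pulmonology", "respiratory medicine", "thoracic surgery"] := by decide

def pvPairs : List (String × Int) := [("cardiology", (0 : Int)), ("cardiac surgery", (0 : Int)), ("cardiovascular surgery", (0 : Int)), ("neurology", (1 : Int)), ("neurosurgery", (1 : Int)), ("neurological surgery", (1 : Int)), ("orthopedics", (2 : Int)), ("orthopedic surgery", (2 : Int)), ("sports medicine", (2 : Int)), ("gastroenterology", (3 : Int)), ("hepatology", (3 : Int)), ("gi surgery", (3 : Int)), ("oncology", (4 : Int)), ("surgical oncology", (4 : Int)), ("medical oncology", (4 : Int)), ("radiation therapy", (4 : Int)), ("urology", (5 : Int)), ("nephrology", (5 : Int)), ("kidney transplant", (5 : Int)), ("obstetrics", (6 : Int)), ("gynecology", (6 : Int)), ("reproductive medicine", (6 : Int)), ("pediatrics", (7 : Int)), ("neonatology", (7 : Int)), ("pediatric surgery", (7 : Int)), ("internal medicine", (8 : Int)), ("general medicine", (8 : Int)), ("family medicine", (8 : Int)), ("emergency medicine", (9 : Int)), ("trauma surgery", (9 : Int)), ("critical care",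 (9 : Int)), ("psychiatry", (10 : Int)), ("psychology", (10 : Int)), ("mental health", (10 : Int)), ("pulmonology", (11 : Int)), ("respiratory medicine", (11 : Int)), ("thoracic surgery", (11 : Int))]

def pvLookup (ps : List (String × Int)) (t : String) : Option Int :=
  ps.foldr (fun p acc => if t == p.1 then some p.2 else acc) none

lemma pvLookup_mem (ps : List (String × Int)) (t : String) (v : Int)
    (h : pvLookup ps t = some v) : (t, v) ∈ ps := by
  induction ps with
  | nil => simp [pvLookup] at h
  | cons p ps ih =>
    rw [pvLookup, List.foldr_cons] at h
    split_ifs at h with ht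
    · rw [beq_iff_eq] at ht
      subst ht
      injection h with h
      subst h
      simp
    · exact List.mem_cons_of_mem _ (ih (by rw [pvLookup]; exact h))

lemma pvClassify_eq_lookup (t : String) : pvClassify t = pvLookup pvPairs t := rfl

lemma pvClassify_mem (t : String) (v : Int) (h : pvClassify t = some v) : (t, v) ∈ pvPairs := by
  rw [pvClassify_eq_lookup] at h
  exact pvLookup_mem pvPairs t v h

lemma pvMem0 (t : String) : ((["cardiology", "cardiac surgery", "cardiovascular surgery"] : List String).contains t) = (pvClassify t == some 0) := by
  cases hc : ((["cardiology", "cardiac surgery", "cardiovascular surgery"] : List String).contains t) with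
  | true =>
    simp only [List.contains_cons, List.contains_nil, Bool.or_false, Bool.or_eq_true,
      beq_iff_eq] at hc
    rcases hc with rfl | rfl | rfl <;> decide
  | false =>
    cases hcl : pvClassify t with
    | none => rfl
    | some v =>
      have hm := pvClassify_mem t v hcl
      by_cases hv : v = 0
      · subst hv
        exfalso
        simp [pvPairs, Prod.mk.injEq] at hm
        rcases hm with rfl | rfl | rfl <;> exact absurd hc (by decide)
      · symm
        rw [beq_eq_false_iff_ne]
        exact fun hcon => hv (Option.some.inj hcon)

lemma pvMem1 (t : String) : ((["neurology", "neurosurgery", "neurological surgery"] : List String).contains t) = (pvClassify t == some 1) := by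
  cases hc : ((["neurology", "neurosurgery", "neurological surgery"] : List String).contains t) with
  | true =>
    simp only [List.contains_cons, List.contains_nil, Bool.or_false, Bool.or_eq_true,
      beq_iff_eq] at hc
    rcases hc with rfl | rfl | rfl <;> decide
  | false =>
    cases hcl : pvClassify t with
    | none => rfl
    | some v =>
      have hm := pvClassify_mem t v hcl
      by_cases hv : v = 1
      · subst hv
        exfalso
        simp [pvPairs, Prod.mk.injEq] at hm
        rcases hm with rfl | rfl | rfl <;> exact absurd hc (by decide)
      · symm
        rw [beq_eq_false_iff_ne]
        exact fun hcon => hv (Option.some.inj hcon)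

lemma pvMem2 (t : String) : ((["orthopedics", "orthopedic surgery", "sports medicine"] : List String).contains t) = (pvClassify t == some 2) := by
  cases hc : ((["orthopedics", "orthopedic surgery", "sports medicine"] : List String).contains t) with
  | true =>
    simp only [List.contains_cons, List.contains_nil, Bool.or_false, Bool.or_eq_true,
      beq_iff_eq] at hc
    rcases hc with rfl | rfl | rfl <;> decide
  | false =>
    cases hcl : pvClassify t with
    | none => rfl
    | some v =>
      have hm := pvClassify_mem t v hcl
      by_cases hv : v = 2
      · subst hv
        exfalso
        simp [pvPairs, Prod.mk.injEq] at hm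
        rcases hm with rfl | rfl | rfl <;> exact absurd hc (by decide)
      · symm
        rw [beq_eq_false_iff_ne]
        exact fun hcon => hv (Option.some.inj hcon)

lemma pvMem3 (t : String) : ((["gastroenterology", "hepatology", "gi surgery"] : List String).contains t) = (pvClassify t == some 3) := by
  cases hc : ((["gastroenterology", "hepatology", "gi surgery"] : List String).contains t) with
  | true =>
    simp only [List.contains_cons, List.contains_nil, Bool.or_false, Bool.or_eq_true,
      beq_iff_eq] at hc
    rcases hc with rfl | rfl | rfl <;> decide
  | false =>
    cases hcl : pvClassify t with
    | none => rfl
    | some v =>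
      have hm := pvClassify_mem t v hcl
      by_cases hv : v = 3
      · subst hv
        exfalso
        simp [pvPairs, Prod.mk.injEq] at hm
        rcases hm with rfl | rfl | rfl <;> exact absurd hc (by decide)
      · symm
        rw [beq_eq_false_iff_ne]
        exact fun hcon => hv (Option.some.inj hcon)

lemma pvMem4 (t : String) : ((["oncology", "surgical oncology", "medical oncology", "radiation therapy"] : List String).contains t) = (pvClassify t == some 4) := by
  cases hc : ((["oncology", "surgical oncology", "medical oncology", "radiation therapy"] : List String).contains t) with
  | true =>
    simp only [List.contains_cons, List.contains_nil, Bool.or_false, Bool.or_eq_true,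
      beq_iff_eq] at hc
    rcases hc with rfl | rfl | rfl | rfl <;> decide
  | false =>
    cases hcl : pvClassify t with
    | none => rfl
    | some v =>
      have hm := pvClassify_mem t v hcl
      by_cases hv : v = 4
      · subst hv
        exfalso
        simp [pvPairs, Prod.mk.injEq] at hm
        rcases hm with rfl | rfl | rfl | rfl <;> exact absurd hc (by decide)
      · symm
        rw [beq_eq_false_iff_ne]
        exact fun hcon => hv (Option.some.inj hcon)

lemma pvMem5 (t : String) : ((["urology", "nephrology", "kidney transplant"] : List String).contains t) = (pvClassify t == some 5) := by
  cases hc : ((["urology", "nephrology", "kidney transplant"] : List String).contains t) with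
  | true =>
    simp only [List.contains_cons, List.contains_nil, Bool.or_false, Bool.or_eq_true,
      beq_iff_eq] at hc
    rcases hc with rfl | rfl | rfl <;> decide
  | false =>
    cases hcl : pvClassify t with
    | none => rfl
    | some v =>
      have hm := pvClassify_mem t v hcl
      by_cases hv : v = 5
      · subst hv
        exfalso
        simp [pvPairs, Prod.mk.injEq] at hm
        rcases hm with rfl | rfl | rfl <;> exact absurd hc (by decide)
      · symm
        rw [beq_eq_false_iff_ne]
        exact fun hcon => hv (Option.some.inj hcon)

lemma pvMem6 (t : String) : ((["obstetrics", "gynecology", "reproductive medicine"] : List String).contains t) = (pvClassify t == some 6) := by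
  cases hc : ((["obstetrics", "gynecology", "reproductive medicine"] : List String).contains t) with
  | true =>
    simp only [List.contains_cons, List.contains_nil, Bool.or_false, Bool.or_eq_true,
      beq_iff_eq] at hc
    rcases hc with rfl | rfl | rfl <;> decide
  | false =>
    cases hcl : pvClassify t with
    | none => rfl
    | some v =>
      have hm := pvClassify_mem t v hcl
      by_cases hv : v = 6
      · subst hv
        exfalso
        simp [pvPairs, Prod.mk.injEq] at hm
        rcases hm with rfl | rfl | rfl <;> exact absurd hc (by decide)
      · symm
        rw [beq_eq_false_iff_ne]
        exact fun hcon => hv (Option.some.inj hcon)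

lemma pvMem7 (t : String) : ((["pediatrics", "neonatology", "pediatric surgery"] : List String).contains t) = (pvClassify t == some 7) := by
  cases hc : ((["pediatrics", "neonatology", "pediatric surgery"] : List String).contains t) with
  | true =>
    simp only [List.contains_cons, List.contains_nil, Bool.or_false, Bool.or_eq_true,
      beq_iff_eq] at hc
    rcases hc with rfl | rfl | rfl <;> decide
  | false =>
    cases hcl : pvClassify t with
    | none => rfl
    | some v =>
      have hm := pvClassify_mem t v hcl
      by_cases hv : v = 7
      · subst hv
        exfalso
        simp [pvPairs, Prod.mk.injEq] at hm
        rcases hm with rfl | rfl | rfl <;> exact absurd hc (by decide)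
      · symm
        rw [beq_eq_false_iff_ne]
        exact fun hcon => hv (Option.some.inj hcon)

lemma pvMem8 (t : String) : ((["internal medicine", "general medicine", "family medicine"] : List String).contains t) = (pvClassify t == some 8) := by
  cases hc : ((["internal medicine", "general medicine", "family medicine"] : List String).contains t) with
  | true =>
    simp only [List.contains_cons, List.contains_nil, Bool.or_false, Bool.or_eq_true,
      beq_iff_eq] at hc
    rcases hc with rfl | rfl | rfl <;> decide
  | false =>
    cases hcl : pvClassify t with
    | none => rfl
    | some v =>
      have hm := pvClassify_mem t v hcl
      by_cases hv : v = 8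
      · subst hv
        exfalso
        simp [pvPairs, Prod.mk.injEq] at hm
        rcases hm with rfl | rfl | rfl <;> exact absurd hc (by decide)
      · symm
        rw [beq_eq_false_iff_ne]
        exact fun hcon => hv (Option.some.inj hcon)

lemma pvMem9 (t : String) : ((["emergency medicine", "trauma surgery", "critical care"] : List String).contains t) = (pvClassify t == some 9) := by
  cases hc : ((["emergency medicine", "trauma surgery", "critical care"] : List String).contains t) with
  | true =>
    simp only [List.contains_cons, List.contains_nil, Bool.or_false, Bool.or_eq_true,
      beq_iff_eq] at hc
    rcases hc with rfl | rfl | rfl <;> decide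
  | false =>
    cases hcl : pvClassify t with
    | none => rfl
    | some v =>
      have hm := pvClassify_mem t v hcl
      by_cases hv : v = 9
      · subst hv
        exfalso
        simp [pvPairs, Prod.mk.injEq] at hm
        rcases hm with rfl | rfl | rfl <;> exact absurd hc (by decide)
      · symm
        rw [beq_eq_false_iff_ne]
        exact fun hcon => hv (Option.some.inj hcon)

lemma pvMem10 (t : String) : ((["psychiatry", "psychology", "mental health"] : List String).contains t) = (pvClassify t == some 10) := by
  cases hc : ((["psychiatry", "psychology", "mental health"] : List String).contains t) with
  | true =>
    simp only [List.contains_cons, List.contains_nil, Bool.or_false, Bool.or_eq_true,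
      beq_iff_eq] at hc
    rcases hc with rfl | rfl | rfl <;> decide
  | false =>
    cases hcl : pvClassify t with
    | none => rfl
    | some v =>
      have hm := pvClassify_mem t v hcl
      by_cases hv : v = 10
      · subst hv
        exfalso
        simp [pvPairs, Prod.mk.injEq] at hm
        rcases hm with rfl | rfl | rfl <;> exact absurd hc (by decide)
      · symm
        rw [beq_eq_false_iff_ne]
        exact fun hcon => hv (Option.some.inj hcon)

lemma pvMem11 (t : String) : ((["pulmonology", "respiratory medicine", "thoracic surgery"] : List String).contains t) = (pvClassify t == some 11) := by
  cases hc : ((["pulmonology", "respiratory medicine", "thoracic surgery"] : List String).contains t) with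
  | true =>
    simp only [List.contains_cons, List.contains_nil, Bool.or_false, Bool.or_eq_true,
      beq_iff_eq] at hc
    rcases hc with rfl | rfl | rfl <;> decide
  | false =>
    cases hcl : pvClassify t with
    | none => rfl
    | some v =>
      have hm := pvClassify_mem t v hcl
      by_cases hv : v = 11
      · subst hv
        exfalso
        simp [pvPairs, Prod.mk.injEq] at hm
        rcases hm with rfl | rfl | rfl <;> exact absurd hc (by decide)
      · symm
        rw [beq_eq_false_iff_ne]
        exact fun hcon => hv (Option.some.inj hcon)

lemma pvClassify_range (t : String) (v : Int) (h : pvClassify t = some v) :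
    v = 0 ∨ v = 1 ∨ v = 2 ∨ v = 3 ∨ v = 4 ∨ v = 5 ∨ v = 6 ∨ v = 7 ∨ v = 8 ∨ v = 9 ∨ v = 10 ∨ v = 11 := by
  have hm : v ∈ pvPairs.map Prod.snd := List.mem_map_of_mem (pvClassify_mem t v h)
  simp [pvPairs] at hm
  omega

lemma pvCombine (o1 o2 : Option Int)
    (h1 : ∀ v, o1 = some v → v = 0 ∨ v = 1 ∨ v = 2 ∨ v = 3 ∨ v = 4 ∨ v = 5 ∨ v = 6 ∨ v = 7 ∨ v = 8 ∨ v = 9 ∨ v = 10 ∨ v = 11)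
    (h2 : ∀ v, o2 = some v → v = 0 ∨ v = 1 ∨ v = 2 ∨ v = 3 ∨ v = 4 ∨ v = 5 ∨ v = 6 ∨ v = 7 ∨ v = 8 ∨ v = 9 ∨ v = 10 ∨ v = 11) :
    (o1 == some 0 && o2 == some 0 || (o1 == some 1 && o2 == some 1 || (o1 == some 2 && o2 == some 2 || (o1 == some 3 && o2 == some 3 || (o1 == some 4 && o2 == some 4 || (o1 == some 5 && o2 == some 5 || (o1 == some 6 && o2 == some 6 || (o1 == some 7 && o2 == some 7 || (o1 == some 8 && o2 == some 8 || (o1 == some 9 && o2 == some 9 || (o1 == some 10 && o2 == some 10 || (o1 == some 11 && o2 == some 11)))))))))))) =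
      (o1.isSome && o1 == o2) := by
  rcases o1 with _ | v
  · simp
  · rcases o2 with _ | w
    · simp
    · rcases h1 v rfl with h | h | h | h | h | h | h | h | h | h | h | h <;>
        rcases h2 w rfl with h' | h' | h' | h' | h' | h' | h' | h' | h' | h' | h' | h' <;>
        subst h <;> subst h' <;> decide

-- ===== VERDICT (by name: the statement is the Claim_ definition above) =====
theorem are_related_specialties_spec : Claim_equal_are_related_specialties := by
  intro spec1 spec2 _
  unfold Spec_are_related_specialties
  unfold are_related_specialties are_related_specialties_alt
  simp only [relatedGroups, List.any_cons, List.any_nil, Bool.or_false]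
  rw [pvMapLower0, pvMapLower1, pvMapLower2, pvMapLower3, pvMapLower4, pvMapLower5, pvMapLower6, pvMapLower7, pvMapLower8, pvMapLower9, pvMapLower10, pvMapLower11]
  rw [pvMem0 (PySem.Str.lower spec1), pvMem1 (PySem.Str.lower spec1), pvMem2 (PySem.Str.lower spec1), pvMem3 (PySem.Str.lower spec1), pvMem4 (PySem.Str.lower spec1), pvMem5 (PySem.Str.lower spec1), pvMem6 (PySem.Str.lower spec1), pvMem7 (PySem.Str.lower spec1), pvMem8 (PySem.Str.lower spec1), pvMem9 (PySem.Str.lower spec1), pvMem10 (PySem.Str.lower spec1), pvMem11 (PySem.Str.lower spec1)]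
  rw [pvMem0 (PySem.Str.lower spec2), pvMem1 (PySem.Str.lower spec2), pvMem2 (PySem.Str.lower spec2), pvMem3 (PySem.Str.lower spec2), pvMem4 (PySem.Str.lower spec2), pvMem5 (PySem.Str.lower spec2), pvMem6 (PySem.Str.lower spec2), pvMem7 (PySem.Str.lower spec2), pvMem8 (PySem.Str.lower spec2), pvMem9 (PySem.Str.lower spec2), pvMem10 (PySem.Str.lower spec2), pvMem11 (PySem.Str.lower spec2)]
  rw [pvIndex_get, pvIndex_get]
  exact pvCombine _ _ (pvClassify_range _) (pvClassify_range _)
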